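-- pv_equiv track=rewrite | github.com/krolikladoshka/hackernewsTM | hackernewstm/tmization.py | append_tm_to_string
-- ===== SOURCE A (Python) =====
-- def append_tm_to_string(text: str) -> str:
--     """
--     performs tmization of text with spaces formatting preserved
--     assuming the word does not contain numerics or special symbols
--     :param text: text for tmization
--     :return: tmized text
--     """
--
--     tmed_text = []
--
--     i = 0
--     while i < len(text):
--         if not text[i].isalpha():
--             tmed_text.append(text[i])
--             i += 1
--
--             continue
--
--         # scroll to the end of the word
--         current_word_length = 0
--         while i < len(text) and text[i].isalpha():
--             tmed_text.append(text[i])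
--             current_word_length += 1
--             i += 1
--
--         if current_word_length >= 6:
--             tmed_text.append('™')
--
--     return ''.join(tmed_text)
-- ===== SOURCE B (Python) =====
-- def append_tm_to_string(text: str) -> str:
--     """
--     performs tmization of text with spaces formatting preserved
--     assuming the word does not contain numerics or special symbols
--     :param text: text for tmization
--     :return: tmized text
--     """
--     # phase 1: split the text into maximal runs of same-kind characters
--     groups = []  # list of (is_alpha, [chars])
--     for ch in text:
--         k = ch.isalpha()
--         if groups and groups[-1][0] == k:
--             groups[-1][1].append(ch)
--         else:
--             groups.append((k, [ch]))
--
--     # phase 2: emit each run; a long alphabetic run gets a trailing trademark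
--     parts = []
--     for k, g in groups:
--         parts.append(''.join(g))
--         if k and len(g) >= 6:
--             parts.append('™')
--
--     return ''.join(parts)
-- ===== Notes on version B (the rewrite author's own statement) =====
-- stated objective: alternative
-- what changed: Replaced A's manual index walk with a nested word-scanning while loop by a two-phase segments-then-process design: one pass groups the text into maximal runs of same isalpha-kind characters, a second pass emits each run (joined in bulk), appending the trademark after alphabetic runs of length >= 6.
import Mathlib
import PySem

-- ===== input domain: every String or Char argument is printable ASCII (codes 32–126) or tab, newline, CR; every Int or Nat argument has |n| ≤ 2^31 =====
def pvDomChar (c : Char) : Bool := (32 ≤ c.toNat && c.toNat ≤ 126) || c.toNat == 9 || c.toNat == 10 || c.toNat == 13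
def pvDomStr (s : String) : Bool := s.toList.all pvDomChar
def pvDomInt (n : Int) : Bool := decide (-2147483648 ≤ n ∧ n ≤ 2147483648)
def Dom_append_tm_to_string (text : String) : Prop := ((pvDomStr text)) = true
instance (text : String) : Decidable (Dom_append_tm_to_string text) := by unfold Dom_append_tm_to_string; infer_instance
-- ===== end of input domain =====

-- B is an alternative two-phase (segment runs, then process runs) implementation of A's
-- index-walk-with-inner-while tmization; same O(n) cost, return values proved equal.

-- ===== PORT A =====
-- inner `while i < len(text) and text[i].isalpha()` loop: collects the word's chars,
-- counts them (current_word_length), and returns the remaining text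
def pvScanWord : List Char → List Char × Nat × List Char
  | [] => ([], 0, [])
  | c :: rest =>
    if PySem.Chars.isalpha c then
      let s := pvScanWord rest
      (c :: s.1, s.2.1 + 1, s.2.2)
    else ([], 0, c :: rest)

-- termination fact for the outer while loop's recursion (cited in decreasing_by)
theorem pvScanWord_rest_le (cs : List Char) : ((pvScanWord cs).2.2).length ≤ cs.length := by
  induction cs with
  | nil => simp [pvScanWord]
  | cons c rest ih =>
    by_cases h : PySem.Chars.isalpha c
    · simp [pvScanWord, h]; omega
    · simp [pvScanWord, h]

theorem pvScanWord_lt (c : Char) (rest : List Char) (h : PySem.Chars.isalpha c = true) :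
    ((pvScanWord (c :: rest)).2.2).length < (c :: rest).length := by
  have := pvScanWord_rest_le rest
  simp [pvScanWord, h]; omega

-- outer `while i < len(text)` loop of A, over the remaining characters
def pvTmA : List Char → List Char
  | [] => []
  | c :: rest =>
    if h : PySem.Chars.isalpha c = false then
      -- not text[i].isalpha(): append the char, advance
      c :: pvTmA rest
    else
      -- scroll to the end of the word, then maybe append '™'
      let s := pvScanWord (c :: rest)
      s.1 ++ (if 6 ≤ s.2.1 then ['™'] else []) ++ pvTmA s.2.2
termination_by cs => cs.length
decreasing_by
  · simp
  · exact pvScanWord_lt c rest (by simpa using h)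

def append_tm_to_string (text : String) : String := String.ofList (pvTmA text.toList)

-- ===== PORT B =====
-- one step of B's first loop: extend the last group or start a new one
def pvAddChar (gs : List (Bool × List Char)) (c : Char) : List (Bool × List Char) :=
  match gs.getLast? with
  | some (k', g) =>
    if k' = PySem.Chars.isalpha c then gs.dropLast ++ [(k', g ++ [c])]
    else gs ++ [(PySem.Chars.isalpha c, [c])]
  | none => [(PySem.Chars.isalpha c, [c])]

-- phase 1: maximal runs of same isalpha-kind characters
def pvGroupsB (cs : List Char) : List (Bool × List Char) := cs.foldl pvAddChar []

-- phase 2: emit each run, '™' after long alphabetic runs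
def pvEmit (gs : List (Bool × List Char)) : List Char :=
  gs.foldl (fun parts kg =>
    parts ++ kg.2 ++ (if kg.1 && decide (6 ≤ kg.2.length) then ['™'] else [])) []

def append_tm_to_string_alt (text : String) : String :=
  String.ofList (pvEmit (pvGroupsB text.toList))

-- ===== PRECONDITION & SPEC =====
def Spec_append_tm_to_string (text : String) (out : String) : Prop := out = append_tm_to_string_alt text
instance (text : String) (out : String) : Decidable (Spec_append_tm_to_string text out) := by unfold Spec_append_tm_to_string; infer_instance

-- ===== CLAIM (what is proved, stated in full; the proofs are below) =====
def Claim_equal_append_tm_to_string : Prop := ∀ (text : String), Dom_append_tm_to_string text → Spec_append_tm_to_string text (append_tm_to_string text)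

-- ===== LEMMAS AND PROOFS =====

-- the per-run contribution of B's second loop, as a flatMap
def pvFlat (gs : List (Bool × List Char)) : List Char :=
  gs.flatMap (fun kg => kg.2 ++ (if kg.1 && decide (6 ≤ kg.2.length) then ['™'] else []))

theorem pvEmit_eq_flat_gen (gs : List (Bool × List Char)) (acc : List Char) :
    gs.foldl (fun parts kg =>
      parts ++ kg.2 ++ (if kg.1 && decide (6 ≤ kg.2.length) then ['™'] else [])) acc
    = acc ++ pvFlat gs := by
  induction gs generalizing acc with
  | nil => simp [pvFlat]
  | cons kg gs ih => simp [pvFlat, List.flatMap_def]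

theorem pvEmit_eq_flat (gs : List (Bool × List Char)) : pvEmit gs = pvFlat gs := by
  unfold pvEmit
  rw [pvEmit_eq_flat_gen]
  simp

-- left-to-right run builder with an open current group (the state of B's first loop)
def pvSpecGo (k : Bool) (acc : List Char) : List Char → List (Bool × List Char)
  | [] => [(k, acc)]
  | c :: rest =>
    if PySem.Chars.isalpha c = k then pvSpecGo k (acc ++ [c]) rest
    else (k, acc) :: pvSpecGo (PySem.Chars.isalpha c) [c] rest

def pvRuns : List Char → List (Bool × List Char)
  | [] => []
  | c :: rest => pvSpecGo (PySem.Chars.isalpha c) [c] rest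

theorem pvFoldl_addChar (cs : List Char) (gs₀ : List (Bool × List Char)) (k : Bool) (acc : List Char) :
    List.foldl pvAddChar (gs₀ ++ [(k, acc)]) cs = gs₀ ++ pvSpecGo k acc cs := by
  induction cs generalizing gs₀ k acc with
  | nil => simp [pvSpecGo]
  | cons c rest ih =>
    by_cases h : PySem.Chars.isalpha c = k
    · simp [pvAddChar, pvSpecGo, h, ih]
    · have h' : ¬ (k = PySem.Chars.isalpha c) := fun e => h e.symm
      simp only [List.foldl_cons, pvAddChar, List.getLast?_concat, List.dropLast_concat, h',
        if_false, pvSpecGo, if_neg h]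
      rw [ih (gs₀ ++ [(k, acc)]) (PySem.Chars.isalpha c) [c]]
      simp

theorem pvGroupsB_eq_runs (cs : List Char) : pvGroupsB cs = pvRuns cs := by
  cases cs with
  | nil => rfl
  | cons c rest =>
    show List.foldl pvAddChar (pvAddChar [] c) rest = _
    have : pvAddChar [] c = [] ++ [(PySem.Chars.isalpha c, [c])] := by simp [pvAddChar]
    rw [this, pvFoldl_addChar rest [] (PySem.Chars.isalpha c) [c]]
    simp [pvRuns]

theorem pvSpecGo_eq (cs : List Char) (k : Bool) (acc : List Char) :
    pvSpecGo k acc cs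
    = (k, acc ++ cs.takeWhile (fun x => PySem.Chars.isalpha x == k))
      :: pvRuns (cs.dropWhile (fun x => PySem.Chars.isalpha x == k)) := by
  induction cs generalizing acc with
  | nil => simp [pvSpecGo, pvRuns]
  | cons c rest ih =>
    by_cases h : PySem.Chars.isalpha c = k
    · simp [pvSpecGo, h, ih]
    · have hb : (PySem.Chars.isalpha c == k) = false := by
        simp [beq_eq_false_iff_ne]; exact h
      simp [pvSpecGo, h, hb, pvRuns]

theorem pvScanWord_spec (cs : List Char) :
    pvScanWord cs = (cs.takeWhile PySem.Chars.isalpha,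
      (cs.takeWhile PySem.Chars.isalpha).length, cs.dropWhile PySem.Chars.isalpha) := by
  induction cs with
  | nil => simp [pvScanWord]
  | cons c rest ih =>
    by_cases h : PySem.Chars.isalpha c
    · simp [pvScanWord, h, ih]
    · simp [pvScanWord, h]

-- A consumes a purely non-alphabetic block one char at a time
theorem pvTmA_nonalpha (g r : List Char) (hg : ∀ x ∈ g, PySem.Chars.isalpha x = false) :
    pvTmA (g ++ r) = g ++ pvTmA r := by
  induction g with
  | nil => simp
  | cons c g ih =>
    have hc : PySem.Chars.isalpha c = false := hg c (by simp)
    simp only [List.cons_append, pvTmA, hc]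
    simp [ih (fun x hx => hg x (by simp [hx]))]

theorem pvTmA_eq_flat_runs (n : Nat) : ∀ cs : List Char, cs.length ≤ n → pvTmA cs = pvFlat (pvRuns cs) := by
  induction n with
  | zero =>
    intro cs h
    have : cs = [] := List.eq_nil_of_length_eq_zero (Nat.le_zero.mp h)
    simp [this, pvTmA, pvRuns, pvFlat]
  | succ n ih =>
    intro cs hlen
    cases cs with
    | nil => simp [pvTmA, pvRuns, pvFlat]
    | cons c rest =>
      by_cases hc : PySem.Chars.isalpha c = false
      · -- non-alphabetic first run
        have hres : pvRuns (c :: rest)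
            = (false, c :: rest.takeWhile (fun x => PySem.Chars.isalpha x == false))
              :: pvRuns (rest.dropWhile (fun x => PySem.Chars.isalpha x == false)) := by
          rw [show pvRuns (c :: rest) = pvSpecGo (PySem.Chars.isalpha c) [c] rest from rfl,
            hc, pvSpecGo_eq]
          rfl
        set p : Char → Bool := fun x => PySem.Chars.isalpha x == false with hp
        have hsplit : rest = rest.takeWhile p ++ rest.dropWhile p :=
          (List.takeWhile_append_dropWhile).symm
        have hall : ∀ x ∈ c :: rest.takeWhile p, PySem.Chars.isalpha x = false := by
          intro x hx
          rcases List.mem_cons.mp hx with h | h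
          · simpa [h] using hc
          · have := List.mem_takeWhile_imp h
            simpa [hp] using this
        have hlt : (rest.dropWhile p).length ≤ n := by
          have h1 : (rest.dropWhile p).length ≤ rest.length := List.length_dropWhile_le _ _
          simp at hlen; omega
        calc pvTmA (c :: rest)
            = pvTmA ((c :: rest.takeWhile p) ++ rest.dropWhile p) :=
              congrArg (fun l => pvTmA (c :: l)) hsplit
          _ = (c :: rest.takeWhile p) ++ pvTmA (rest.dropWhile p) :=
              pvTmA_nonalpha _ _ hall
          _ = (c :: rest.takeWhile p) ++ pvFlat (pvRuns (rest.dropWhile p)) := by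
              rw [ih _ hlt]
          _ = pvFlat (pvRuns (c :: rest)) := by
              rw [hres]; simp [pvFlat, List.flatMap_cons]
      · -- alphabetic first run
        have hc' : PySem.Chars.isalpha c = true := by simpa using hc
        have hbeq : (fun x => PySem.Chars.isalpha x == true) = PySem.Chars.isalpha := by
          funext x; simp
        have hres : pvRuns (c :: rest)
            = (true, c :: rest.takeWhile PySem.Chars.isalpha)
              :: pvRuns (rest.dropWhile PySem.Chars.isalpha) := by
          rw [show pvRuns (c :: rest) = pvSpecGo (PySem.Chars.isalpha c) [c] rest from rfl,
            hc', pvSpecGo_eq, hbeq]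
          rfl
        have hlt : (rest.dropWhile PySem.Chars.isalpha).length ≤ n := by
          have h1 : (rest.dropWhile PySem.Chars.isalpha).length ≤ rest.length :=
            List.length_dropWhile_le _ _
          simp at hlen; omega
        have hscan : pvScanWord (c :: rest)
            = (c :: rest.takeWhile PySem.Chars.isalpha,
               (c :: rest.takeWhile PySem.Chars.isalpha).length,
               rest.dropWhile PySem.Chars.isalpha) := by
          rw [pvScanWord_spec]
          simp [hc']
        rw [show pvTmA (c :: rest)
              = (pvScanWord (c :: rest)).1
                ++ (if 6 ≤ (pvScanWord (c :: rest)).2.1 then ['™'] else [])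
                ++ pvTmA (pvScanWord (c :: rest)).2.2 by simp [pvTmA, hc]]
        rw [hscan, hres, ih _ hlt]
        simp only [pvFlat, List.flatMap_cons]
        simp

-- ===== VERDICT (by name: the statement is the Claim_ definition above) =====
theorem append_tm_to_string_spec : Claim_equal_append_tm_to_string := by
  intro text _
  unfold Spec_append_tm_to_string append_tm_to_string append_tm_to_string_alt
  rw [pvGroupsB_eq_runs, pvEmit_eq_flat,
    pvTmA_eq_flat_runs text.toList.length text.toList (le_refl _)]
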